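-- pv_equiv track=rewrite | github.com/danielhstahl/2024-aoc | day2.py | check_safe_remove_item
-- ===== SOURCE A (Python) =====
-- from typing import List
--
-- def check_increasing(levels: List[int]) -> bool:
--     for item1, item2 in zip(levels[:-1], levels[1:]):
--         if item1 >= item2:
--             return False
--     return True
--
-- def check_decreasing(levels: List[int]) -> bool:
--     for item1, item2 in zip(levels[:-1], levels[1:]):
--         if item1 <= item2:
--             return False
--     return True
--
-- def check_range(levels: List[int]) -> bool:
--     for item1, item2 in zip(levels[:-1], levels[1:]):
--         if abs(item1 - item2) > 3:
--             return False
--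
--     return True
--
-- def check_safe(levels: List[int]) -> bool:
--     if check_increasing(levels):
--         if check_range(levels):
--             return True
--     elif check_decreasing(levels):
--         if check_range(levels):
--             return True
--     return False
--
-- def check_safe_remove_item(levels: List[int], end: bool = False) -> bool:
--     if check_safe(levels):
--         return True
--     elif not end:
--         for index in range(len(levels)):
--             new_level = levels[:index] + levels[index + 1 :]
--             if check_safe_remove_item(new_level, True):
--                 return True
--     return False
-- ===== SOURCE B (Python) =====
-- from typing import List
--
-- def _all_diffs_in(levels: List[int], lo: int, hi: int) -> bool:
--     return all(lo <= b - a <= hi for a, b in zip(levels, levels[1:]))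
--
-- def _is_safe(levels: List[int]) -> bool:
--     return _all_diffs_in(levels, 1, 3) or _all_diffs_in(levels, -3, -1)
--
-- def _first_bad(levels: List[int], lo: int, hi: int):
--     for i, (a, b) in enumerate(zip(levels, levels[1:])):
--         if not (lo <= b - a <= hi):
--             return i
--     return None
--
-- def check_safe_remove_item(levels: List[int], end: bool = False) -> bool:
--     if _is_safe(levels):
--         return True
--     if end:
--         return False
--     # The list is unsafe, so each direction has a first violating adjacent pair;
--     # only removing one element of such a pair can make that direction safe.
--     cands = []
--     i = _first_bad(levels, 1, 3)
--     if i is not None: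
--         cands += [i, i + 1]
--     j = _first_bad(levels, -3, -1)
--     if j is not None:
--         cands += [j, j + 1]
--     return any(_is_safe(levels[:k] + levels[k + 1:]) for k in cands)
-- ===== Notes on version B (the rewrite author's own statement) =====
-- stated objective: alternative
-- what changed: A retries the full safety check on every one-element-removed copy of the list (quadratic); B finds, in one linear pass per direction, the first adjacent pair violating that direction and tests only the at most four removals that touch such a pair (intended as asymptotically cheaper, but a timing run's measurements were inconsistent across runs, so no speed is claimed).
import Mathlib
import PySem

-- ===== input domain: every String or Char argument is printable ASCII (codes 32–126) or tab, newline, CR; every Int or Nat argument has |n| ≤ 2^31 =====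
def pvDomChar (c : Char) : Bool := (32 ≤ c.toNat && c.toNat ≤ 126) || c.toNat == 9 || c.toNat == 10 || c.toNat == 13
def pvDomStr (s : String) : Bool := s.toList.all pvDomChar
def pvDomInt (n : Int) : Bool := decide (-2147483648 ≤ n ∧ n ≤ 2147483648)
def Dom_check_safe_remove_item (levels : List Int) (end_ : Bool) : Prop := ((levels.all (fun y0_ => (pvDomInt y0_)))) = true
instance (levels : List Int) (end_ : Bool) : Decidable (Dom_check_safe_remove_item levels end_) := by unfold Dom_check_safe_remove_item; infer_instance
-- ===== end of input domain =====

-- B replaces A's try-every-removal scan by one linear pass per direction: only the elements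
-- of the first violating adjacent pair are candidate removals (objective: alternative).


-- ===== PORT A =====
-- 'for a, b in zip(levels[:-1], levels[1:]): if cond: return False / return True' is '.all (!cond)'.
def check_increasing (levels : List Int) : Bool :=
  ((PySem.List.slice levels none (some (-1))).zip (PySem.List.slice levels (some 1) none)).all
    (fun p => !decide (p.1 ≥ p.2))

def check_decreasing (levels : List Int) : Bool :=
  ((PySem.List.slice levels none (some (-1))).zip (PySem.List.slice levels (some 1) none)).all
    (fun p => !decide (p.1 ≤ p.2))

def check_range (levels : List Int) : Bool :=
  ((PySem.List.slice levels none (some (-1))).zip (PySem.List.slice levels (some 1) none)).all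
    (fun p => !decide (3 < (p.1 - p.2).natAbs))

def check_safe (levels : List Int) : Bool :=
  if check_increasing levels then
    (if check_range levels then true else false)
  else if check_decreasing levels then
    (if check_range levels then true else false)
  else false

def check_safe_remove_item (levels : List Int) (end_ : Bool) : Bool :=
  if check_safe levels then true
  else
    match end_ with
    | true => false
    | false =>
      (List.range levels.length).any (fun index =>
        check_safe_remove_item
          (PySem.List.slice levels none (some (index : Int)) ++
           PySem.List.slice levels (some ((index : Int) + 1)) none) true)
termination_by levels.length + (match end_ with | true => 0 | false => 1)
decreasing_by
  have h1 : ((index : Int) + 1) = ((index + 1 : Nat) : Int) := by push_cast; ring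
  rw [PySem.List.slice_to_natCast, h1, PySem.List.slice_from_natCast]
  simp [List.length_append, List.length_take, List.length_drop]
  omega

-- ===== PORT B =====
def allDiffsIn (levels : List Int) (lo hi : Int) : Bool :=
  (levels.zip (PySem.List.slice levels (some 1) none)).all
    (fun p => decide (lo ≤ p.2 - p.1) && decide (p.2 - p.1 ≤ hi))

def isSafe (levels : List Int) : Bool :=
  allDiffsIn levels 1 3 || allDiffsIn levels (-3) (-1)

def firstBad (levels : List Int) (lo hi : Int) : Option Nat :=
  (levels.zip (PySem.List.slice levels (some 1) none)).findIdx?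
    (fun p => !(decide (lo ≤ p.2 - p.1) && decide (p.2 - p.1 ≤ hi)))

-- levels[:k] + levels[k+1:] with k a Nat index is exactly take k ++ drop (k+1)
def check_safe_remove_item_alt (levels : List Int) (end_ : Bool) : Bool :=
  if isSafe levels then true
  else
    match end_ with
    | true => false
    | false =>
      let cands : List Nat :=
        (match firstBad levels 1 3 with | some i => [i, i + 1] | none => []) ++
        (match firstBad levels (-3) (-1) with | some j => [j, j + 1] | none => [])
      cands.any (fun k => isSafe (levels.take k ++ levels.drop (k + 1)))

-- ===== PRECONDITION & SPEC =====
def Spec_check_safe_remove_item (levels : List Int) (end_ : Bool) (out : Bool) : Prop := out = check_safe_remove_item_alt levels end_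
instance (levels : List Int) (end_ : Bool) (out : Bool) : Decidable (Spec_check_safe_remove_item levels end_ out) := by unfold Spec_check_safe_remove_item; infer_instance

-- ===== CLAIM (what is proved, stated in full; the proofs are below) =====
def Claim_equal_check_safe_remove_item : Prop := ∀ (levels : List Int) (end_ : Bool), Dom_check_safe_remove_item levels end_ → Spec_check_safe_remove_item levels end_ (check_safe_remove_item levels end_)

-- ===== LEMMAS AND PROOFS =====

lemma dropLast_zip_tail (xs : List Int) : xs.dropLast.zip xs.tail = xs.zip xs.tail := by
  apply List.ext_getElem
  · simp [List.length_zip]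
  · intro i h1 h2
    rw [List.getElem_zip, List.getElem_zip, List.getElem_dropLast]

lemma zip_tail_all_iff (xs : List Int) (p : Int × Int → Bool) :
    (xs.zip xs.tail).all p = true ↔ ∀ k (h : k + 1 < xs.length), p (xs[k], xs[k + 1]) = true := by
  rw [List.all_eq_true]
  constructor
  · intro h k hk
    have hmem : (xs[k], xs[k + 1]) ∈ xs.zip xs.tail := by
      rw [List.mem_iff_getElem]
      refine ⟨k, by simp [List.length_zip]; omega, ?_⟩
      rw [List.getElem_zip, List.getElem_tail]
    exact h _ hmem
  · intro h x hx
    rw [List.mem_iff_getElem] at hx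
    obtain ⟨i, hi, rfl⟩ := hx
    rw [List.getElem_zip, List.getElem_tail]
    apply h

lemma inc_iff (xs : List Int) :
    check_increasing xs = true ↔ ∀ k (h : k + 1 < xs.length), xs[k] < xs[k + 1] := by
  unfold check_increasing
  rw [PySem.List.slice_to_neg_one, PySem.List.slice_from_one, dropLast_zip_tail, zip_tail_all_iff]
  refine forall_congr' fun k => forall_congr' fun hk => ?_
  simp

lemma dec_iff (xs : List Int) :
    check_decreasing xs = true ↔ ∀ k (h : k + 1 < xs.length), xs[k + 1] < xs[k] := by
  unfold check_decreasing
  rw [PySem.List.slice_to_neg_one, PySem.List.slice_from_one, dropLast_zip_tail, zip_tail_all_iff]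
  refine forall_congr' fun k => forall_congr' fun hk => ?_
  simp

lemma rng_iff (xs : List Int) :
    check_range xs = true ↔ ∀ k (h : k + 1 < xs.length), (xs[k] - xs[k + 1]).natAbs ≤ 3 := by
  unfold check_range
  rw [PySem.List.slice_to_neg_one, PySem.List.slice_from_one, dropLast_zip_tail, zip_tail_all_iff]
  refine forall_congr' fun k => forall_congr' fun hk => ?_
  simp

lemma allDiffsIn_iff (xs : List Int) (lo hi : Int) :
    allDiffsIn xs lo hi = true ↔
      ∀ k (h : k + 1 < xs.length), lo ≤ xs[k + 1] - xs[k] ∧ xs[k + 1] - xs[k] ≤ hi := by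
  unfold allDiffsIn
  rw [PySem.List.slice_from_one, zip_tail_all_iff]
  refine forall_congr' fun k => forall_congr' fun hk => ?_
  simp

lemma safe_iff (xs : List Int) : check_safe xs = true ↔ isSafe xs = true := by
  unfold check_safe isSafe
  rw [Bool.or_eq_true, allDiffsIn_iff, allDiffsIn_iff]
  constructor
  · intro h
    by_cases h1 : check_increasing xs = true
    · rw [if_pos h1] at h
      by_cases h2 : check_range xs = true
      · left
        intro k hk
        have hi := (inc_iff xs).mp h1 k hk
        have hr := (rng_iff xs).mp h2 k hk
        omega
      · rw [if_neg h2] at h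
        exact absurd h (by simp)
    · rw [if_neg h1] at h
      by_cases h3 : check_decreasing xs = true
      · rw [if_pos h3] at h
        by_cases h4 : check_range xs = true
        · right
          intro k hk
          have hd := (dec_iff xs).mp h3 k hk
          have hr := (rng_iff xs).mp h4 k hk
          omega
        · rw [if_neg h4] at h
          exact absurd h (by simp)
      · rw [if_neg h3] at h
        exact absurd h (by simp)
  · intro h
    rcases h with h | h
    · rw [if_pos ((inc_iff xs).mpr fun k hk => by have := h k hk; omega),
          if_pos ((rng_iff xs).mpr fun k hk => by have := h k hk; omega)]
    · have hr := (rng_iff xs).mpr fun k hk => by have := h k hk; omega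
      by_cases hin : check_increasing xs = true
      · rw [if_pos hin, if_pos hr]
      · rw [if_neg hin,
            if_pos ((dec_iff xs).mpr fun k hk => by have := h k hk; omega), if_pos hr]

lemma firstBad_isSome (xs : List Int) (lo hi : Int) (h : allDiffsIn xs lo hi = false) :
    ∃ i, firstBad xs lo hi = some i := by
  cases hf : firstBad xs lo hi with
  | some i => exact ⟨i, rfl⟩
  | none =>
    exfalso
    unfold firstBad at hf
    rw [List.findIdx?_eq_none_iff] at hf
    have : allDiffsIn xs lo hi = true := by
      unfold allDiffsIn
      rw [List.all_eq_true]
      intro x hx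
      have := hf x hx
      simpa using this
    rw [this] at h
    exact Bool.noConfusion h

lemma firstBad_spec (xs : List Int) (lo hi : Int) (i : Nat) (h : firstBad xs lo hi = some i) :
    ∃ (hl : i + 1 < xs.length), ¬(lo ≤ xs[i + 1] - xs[i] ∧ xs[i + 1] - xs[i] ≤ hi) := by
  unfold firstBad at h
  rw [PySem.List.slice_from_one, List.findIdx?_eq_some_iff_getElem] at h
  obtain ⟨hlen, hp, _⟩ := h
  have hl : i + 1 < xs.length := by
    simp [List.length_zip] at hlen
    omega
  refine ⟨hl, ?_⟩
  rw [List.getElem_zip, List.getElem_tail] at hp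
  simp at hp ⊢
  omega

-- Removing index j from xs cannot repair a violating pair (i, i+1) unless j is one of its ends.
lemma rm_bad (xs : List Int) (lo hi : Int) (i j : Nat)
    (hi1 : i + 1 < xs.length)
    (hv : ¬(lo ≤ xs[i + 1] - xs[i] ∧ xs[i + 1] - xs[i] ≤ hi))
    (hj : j < xs.length)
    (hs : allDiffsIn (xs.take j ++ xs.drop (j + 1)) lo hi = true) :
    j = i ∨ j = i + 1 := by
  set R := xs.take j ++ xs.drop (j + 1) with hRdef
  have htl : (List.take j xs).length = j := by rw [List.length_take]; omega
  have hR : R.length = xs.length - 1 := by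
    rw [hRdef, List.length_append, htl, List.length_drop]; omega
  have hget_lt : ∀ k (hk : k < R.length), k < j → R[k] = xs[k] := by
    intro k hk hkj
    have hk' : k < (List.take j xs ++ List.drop (j + 1) xs).length := hk
    show (List.take j xs ++ List.drop (j + 1) xs)[k] = xs[k]
    rw [List.getElem_append_left (by omega : k < (List.take j xs).length), List.getElem_take]
  have hget_ge : ∀ k m (hk : k < R.length) (hm : m < xs.length), j ≤ k → m = k + 1 → R[k] = xs[m] := by
    intro k m hk hm hjk hmk
    subst hmk
    have h2 : (List.take j xs).length ≤ k := by omega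
    have hk' : k < (List.take j xs ++ List.drop (j + 1) xs).length := hk
    show (List.take j xs ++ List.drop (j + 1) xs)[k] = xs[k + 1]
    rw [List.getElem_append_right h2, List.getElem_drop]
    have he : j + 1 + (k - (List.take j xs).length) = k + 1 := by omega
    simp only [he]
  rw [allDiffsIn_iff] at hs
  have hs' : ∀ a b (ha : a < R.length) (hb : b < R.length), b = a + 1 →
      lo ≤ R[b] - R[a] ∧ R[b] - R[a] ≤ hi := by
    intro a b ha hb hab
    subst hab
    exact hs a hb
  by_contra hne
  simp only [not_or] at hne
  obtain ⟨hne1, hne2⟩ := hne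
  rcases Nat.lt_or_ge j i with hc | hc
  · -- j < i: the pair survives at positions (i-1, i)
    have ha : i - 1 < R.length := by omega
    have hb : i < R.length := by omega
    have := hs' (i - 1) i ha hb (by omega)
    rw [hget_ge (i - 1) i ha (by omega) (by omega) (by omega),
        hget_ge i (i + 1) hb (by omega) (by omega) rfl] at this
    exact hv this
  · -- j ≥ i + 2: the pair survives at positions (i, i+1)
    have hc2 : i + 2 ≤ j := by omega
    have ha : i < R.length := by omega
    have hb : i + 1 < R.length := by omega
    have := hs' i (i + 1) ha hb rfl
    rw [hget_lt i ha (by omega), hget_lt (i + 1) hb (by omega)] at this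
    exact hv this

lemma A_end_true (ys : List Int) : check_safe_remove_item ys true = check_safe ys := by
  rw [check_safe_remove_item]
  cases check_safe ys <;> simp

lemma A_unfold_false (xs : List Int) :
    check_safe_remove_item xs false =
      (check_safe xs ||
        (List.range xs.length).any (fun i => check_safe (xs.take i ++ xs.drop (i + 1)))) := by
  rw [check_safe_remove_item]
  cases h : check_safe xs
  · simp only [Bool.false_eq_true, if_false, Bool.false_or]
    apply PySem.List.any_congr_mem
    intro i _
    have h1 : ((i : Int) + 1) = ((i + 1 : Nat) : Int) := by push_cast; ring
    rw [PySem.List.slice_to_natCast, h1, PySem.List.slice_from_natCast, A_end_true]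
  · simp

lemma B_end_true (ys : List Int) : check_safe_remove_item_alt ys true = isSafe ys := by
  unfold check_safe_remove_item_alt
  cases isSafe ys <;> simp

-- ===== VERDICT (by name: the statement is the Claim_ definition above) =====
theorem check_safe_remove_item_spec : Claim_equal_check_safe_remove_item := by
  intro levels end_ _
  unfold Spec_check_safe_remove_item
  cases end_
  · -- end_ = false
    rw [A_unfold_false]
    by_cases hsafe : check_safe levels = true
    · have hb : isSafe levels = true := (safe_iff levels).mp hsafe
      unfold check_safe_remove_item_alt
      simp [hsafe, hb]
    · have hb : isSafe levels = false := by
        cases h : isSafe levels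
        · rfl
        · exact absurd ((safe_iff levels).mpr h) hsafe
      have hsafe' : check_safe levels = false := by
        cases h : check_safe levels
        · rfl
        · exact absurd h hsafe
      unfold check_safe_remove_item_alt
      rw [hb]
      simp only [Bool.false_eq_true, if_false, hsafe', Bool.false_or]
      -- both directions have a first violation
      have hor : allDiffsIn levels 1 3 = false ∧ allDiffsIn levels (-3) (-1) = false := by
        unfold isSafe at hb
        constructor <;> (cases h1 : allDiffsIn levels 1 3 <;> cases h2 : allDiffsIn levels (-3) (-1) <;>
          simp [h1, h2] at hb ⊢)
      obtain ⟨i13, hfb13⟩ := firstBad_isSome levels 1 3 hor.1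
      obtain ⟨idec, hfbdec⟩ := firstBad_isSome levels (-3) (-1) hor.2
      obtain ⟨hl13, hv13⟩ := firstBad_spec levels 1 3 i13 hfb13
      obtain ⟨hldec, hvdec⟩ := firstBad_spec levels (-3) (-1) idec hfbdec
      rw [hfb13, hfbdec]
      apply Bool.eq_iff_iff.mpr
      rw [List.any_eq_true, List.any_eq_true]
      constructor
      · rintro ⟨j, hjmem, hfj⟩
        have hjn : j < levels.length := List.mem_range.mp hjmem
        have hsj : isSafe (levels.take j ++ levels.drop (j + 1)) = true :=
          (safe_iff _).mp hfj
        refine ⟨j, ?_, hsj⟩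
        have hor' : allDiffsIn (levels.take j ++ levels.drop (j + 1)) 1 3 = true ∨
            allDiffsIn (levels.take j ++ levels.drop (j + 1)) (-3) (-1) = true := by
          have h' := hsj
          unfold isSafe at h'
          simpa using h'
        rcases hor' with h13 | hdec
        · rcases rm_bad levels 1 3 i13 j hl13 hv13 hjn h13 with rfl | rfl <;> simp
        · rcases rm_bad levels (-3) (-1) idec j hldec hvdec hjn hdec with rfl | rfl <;> simp
      · rintro ⟨j, hjmem, hgj⟩
        have hjn : j < levels.length := by
          simp at hjmem
          rcases hjmem with rfl | rfl | rfl | rfl <;> omega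
        exact ⟨j, List.mem_range.mpr hjn, (safe_iff _).mpr hgj⟩
  · -- end_ = true
    rw [A_end_true, B_end_true]
    cases h : check_safe levels
    · cases h2 : isSafe levels
      · rfl
      · exact absurd ((safe_iff levels).mpr h2) (by simp [h])
    · exact ((safe_iff levels).mp h).symm
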